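-- pv_equiv track=rewrite | github.com/HappyLoony/Daman_QGIS | tools/F_1_data/submodules/Fsm_1_1_5_dxf_block_importer.py | _sanitize_field_name
-- ===== SOURCE A (Python) =====
-- from typing import Optional, List, Dict, Any
--
-- def _sanitize_field_name(name: str, existing_names: Optional[set] = None) -> str:
--     """
--     Очистка имени поля от недопустимых символов
--
--     Поддерживает кириллицу в именах полей (isalnum() корректно работает с Unicode).
--
--     Args:
--         name: Исходное имя (может содержать кириллицу)
--         existing_names: Множество уже использованных имён (для предотвращения дубликатов)
--
--     Returns:
--         Очищенное имя поля
--     """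
--     # Заменяем недопустимые символы на underscore
--     # isalnum() корректно обрабатывает Unicode (включая кириллицу)
--     sanitized = name.replace(' ', '_').replace('-', '_')
--     sanitized = ''.join(c if c.isalnum() or c == '_' else '_' for c in sanitized)
--
--     # Убираем множественные underscore
--     while '__' in sanitized:
--         sanitized = sanitized.replace('__', '_')
--
--     # Убираем underscore в начале и конце
--     sanitized = sanitized.strip('_')
--
--     # Если пустое - генерируем имя
--     if not sanitized:
--         sanitized = "attr"
--
--     # Обработка дубликатов если указано множество существующих имён
--     if existing_names is not None:
--         base_name = sanitized
--         counter = 1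
--         while sanitized in existing_names:
--             sanitized = f"{base_name}_{counter}"
--             counter += 1
--         existing_names.add(sanitized)
--
--     return sanitized
-- ===== SOURCE B (Python) =====
-- from typing import Optional
--
-- def _sanitize_field_name(name: str, existing_names: Optional[set] = None) -> str:
--     # Single pass: emit alnum chars; a run of non-alnum chars between emitted
--     # chars becomes one deferred '_' (so leading/trailing/multiple separators
--     # never appear in the output).
--     out = []
--     pending = False
--     for c in name:
--         if c.isalnum():
--             if pending:
--                 out.append('_')
--                 pending = False
--             out.append(c)
--         elif out:
--             pending = True
--     sanitized = ''.join(out) or "attr"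
--     if existing_names is not None:
--         base_name = sanitized
--         counter = 1
--         while sanitized in existing_names:
--             sanitized = f"{base_name}_{counter}"
--             counter += 1
--         existing_names.add(sanitized)
--     return sanitized
-- ===== Notes on version B (the rewrite author's own statement) =====
-- stated objective: simpler
-- what changed: Replaces the two replace passes, the per-character join pass, the repeated underscore-run-collapsing while loop and the final two-sided underscore strip by one single pass over the characters with a deferred-underscore flag; the duplicate-counter loop is kept unchanged.
import Mathlib
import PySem

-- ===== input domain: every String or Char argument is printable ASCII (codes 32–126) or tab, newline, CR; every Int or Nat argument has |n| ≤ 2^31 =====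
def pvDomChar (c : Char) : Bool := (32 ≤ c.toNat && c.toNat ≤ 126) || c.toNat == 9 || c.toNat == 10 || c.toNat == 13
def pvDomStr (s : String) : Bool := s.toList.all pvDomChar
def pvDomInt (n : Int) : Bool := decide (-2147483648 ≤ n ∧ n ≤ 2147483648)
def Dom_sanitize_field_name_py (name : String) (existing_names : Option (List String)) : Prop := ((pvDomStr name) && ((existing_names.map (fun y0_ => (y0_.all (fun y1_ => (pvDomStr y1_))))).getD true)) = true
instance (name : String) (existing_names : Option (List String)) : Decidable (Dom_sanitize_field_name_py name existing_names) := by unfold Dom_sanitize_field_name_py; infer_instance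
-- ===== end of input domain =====

-- B replaces A's replace/replace/join passes, underscore-run-collapsing while loop and
-- two-sided underscore strip by one single pass with a deferred-underscore flag; the
-- duplicate-counter loop is unchanged.
-- A mutates the Python set `existing_names` (adds the chosen name); B performs the same mutation;
-- the equivalence proved here is about the return value.

-- ===== PORT A =====
-- model of one pass of s.replace("__", "_") (needed here only to justify the while loop's
-- termination; proved equal to PySem.Chars.replace below)
def pvCollapse1 : List Char → List Char
  | [] => []
  | c :: t =>
    if c = '_' ∧ t.head? = some '_' then '_' :: pvCollapse1 t.tail else c :: pvCollapse1 t
termination_by s => s.length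
decreasing_by
  · simp only [List.length_cons, List.length_tail]; omega
  · simp

theorem pvCollapse1_length_le (s : List Char) : (pvCollapse1 s).length ≤ s.length := by
  fun_induction pvCollapse1 s with
  | case1 => simp
  | case2 c t h ih =>
      obtain ⟨rfl, h2⟩ := h
      cases t with
      | nil => simp at h2
      | cons d t' =>
          have hd : d = '_' := by simpa using h2
          subst hd
          simp only [List.tail_cons] at ih ⊢
          simp only [List.length_cons]
          omega
  | case3 c t h ih => simpa using ih

theorem pvReplace_uu_go (fuel : Nat) (l acc : List Char) (h : l.length ≤ fuel) :
    PySem.Chars.replace.go ['_', '_'] ['_'] fuel l acc = acc.reverse ++ pvCollapse1 l := by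
  induction fuel generalizing l acc with
  | zero =>
      have : l = [] := by cases l <;> simp_all
      subst this; simp [PySem.Chars.replace.go, pvCollapse1]
  | succ fuel ih =>
      cases l with
      | nil => simp [PySem.Chars.replace.go, pvCollapse1]
      | cons c t =>
        rw [PySem.Chars.replace.go]
        by_cases hc : c = '_' ∧ t.head? = some '_'
        · obtain ⟨rfl, h2⟩ := hc
          cases t with
          | nil => simp at h2
          | cons d t' =>
              have hd : d = '_' := by simpa using h2
              subst hd
              have hp : ['_', '_'].isPrefixOf ('_' :: '_' :: t') = true := by
                simp [List.isPrefixOf]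
              simp only [hp, if_true]
              rw [show List.drop ['_', '_'].length ('_' :: '_' :: t') = t' from rfl]
              rw [ih t' _ (by simp at h ⊢; omega)]
              rw [pvCollapse1]
              simp
        · have hp : ['_', '_'].isPrefixOf (c :: t) = false := by
            cases t with
            | nil => simp [List.isPrefixOf]
            | cons d t' =>
                simp only [List.head?_cons, Option.some.injEq] at hc
                simp [List.isPrefixOf]
                intro h1 h2
                exact hc ⟨h1.symm, h2.symm⟩
          simp only [hp, Bool.false_eq_true, if_false]
          rw [ih t (c :: acc) (by simp at h ⊢; omega)]
          rw [pvCollapse1]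
          simp [hc]

theorem pvReplace_uu (s : List Char) :
    PySem.Chars.replace s ['_', '_'] ['_'] = pvCollapse1 s := by
  rw [PySem.Chars.replace]
  simpa using pvReplace_uu_go s.length s [] le_rfl

theorem pvCollapse1_length_lt (s : List Char) (h : ['_', '_'] <:+: s) :
    (pvCollapse1 s).length < s.length := by
  induction s with
  | nil => simp at h
  | cons c t ih =>
      rw [List.infix_cons_iff] at h
      rw [pvCollapse1]
      by_cases hc : c = '_' ∧ t.head? = some '_'
      · obtain ⟨rfl, h2⟩ := hc
        cases t with
        | nil => simp at h2
        | cons d t' =>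
            have hd : d = '_' := by simpa using h2
            subst hd
            have := pvCollapse1_length_le t'
            rw [if_pos (by simp : '_' = '_' ∧ ('_' :: t').head? = some '_')]
            simp only [List.tail_cons, List.length_cons]
            omega
      · have hpre : ¬ ['_', '_'] <+: c :: t := by
          intro hp
          obtain ⟨u, hu⟩ := hp
          cases t with
          | nil => simp at hu
          | cons d t' =>
              simp at hu
              exact hc ⟨hu.1.symm, by simp [hu.2.1.symm]⟩
        have ht : ['_', '_'] <:+: t := h.resolve_left hpre
        simp only [hc, if_false, List.length_cons]
        have := ih ht; omega

-- the 'while "__" in sanitized: sanitized = sanitized.replace("__", "_")' loop of A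
def pvCollapseLoop (s : List Char) : List Char :=
  if h : PySem.Chars.isIn ['_', '_'] s then
    pvCollapseLoop (PySem.Chars.replace s ['_', '_'] ['_'])
  else s
termination_by s.length
decreasing_by
  rw [pvReplace_uu]
  exact pvCollapse1_length_lt s ((PySem.Chars.isIn_iff_infix _ _).mp h)

-- the duplicate-counter loop, shared verbatim by A and B (B's Python keeps it unchanged);
-- fuel names.length + 1 suffices: the candidate names are pairwise distinct strings
def pvDedupLoop (names : List String) (base cur : String) (counter : Nat) (fuel : Nat) : String :=
  match fuel with
  | 0 => cur
  | fuel + 1 =>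
      if names.contains cur then
        pvDedupLoop names base (base ++ "_" ++ PySem.Int.toStr counter) (counter + 1) fuel
      else cur

def pvDedup (names : List String) (base : String) : String :=
  pvDedupLoop names base base 1 (names.length + 1)

def sanitize_field_name_py (name : String) (existing_names : Option (List String)) : String :=
  let s1 := PySem.Chars.replace name.toList [' '] ['_']
  let s2 := PySem.Chars.replace s1 ['-'] ['_']
  -- ''.join(c if c.isalnum() or c == '_' else '_' for c in sanitized): per-character map
  let s3 := s2.map (fun c => if PySem.Chars.isalnum c || c == '_' then c else '_')
  let s4 := pvCollapseLoop s3
  let s5 := PySem.Chars.stripChars s4 ['_']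
  let s6 := if s5.isEmpty then "attr".toList else s5
  match existing_names with
  | none => String.ofList s6
  | some names => pvDedup names (String.ofList s6)

-- ===== PORT B =====
def pvEmitStep (st : List Char × Bool) (c : Char) : List Char × Bool :=
  if PySem.Chars.isalnum c then ((if st.2 then st.1 ++ ['_'] else st.1) ++ [c], false)
  else if st.1.isEmpty then st
  else (st.1, true)

def sanitize_field_name_py_alt (name : String) (existing_names : Option (List String)) : String :=
  let out := (name.toList.foldl pvEmitStep ([], false)).1
  let s := if out.isEmpty then "attr".toList else out
  match existing_names with
  | none => String.ofList s
  | some names => pvDedup names (String.ofList s)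

-- ===== PRECONDITION & SPEC =====
def Spec_sanitize_field_name_py (name : String) (existing_names : Option (List String)) (out : String) : Prop := out = sanitize_field_name_py_alt name existing_names
instance (name : String) (existing_names : Option (List String)) (out : String) : Decidable (Spec_sanitize_field_name_py name existing_names out) := by unfold Spec_sanitize_field_name_py; infer_instance

-- ===== CLAIM (what is proved, stated in full; the proofs are below) =====
def Claim_equal_sanitize_field_name_py : Prop := ∀ (name : String) (existing_names : Option (List String)), Dom_sanitize_field_name_py name existing_names → Spec_sanitize_field_name_py name existing_names (sanitize_field_name_py name existing_names)

-- ===== LEMMAS AND PROOFS =====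

-- canonical collapse of '_' runs to a single '_'
def pvStep (c : Char) (r : List Char) : List Char :=
  if c = '_' ∧ r.head? = some '_' then r else c :: r

def pvSqueeze : List Char → List Char
  | [] => []
  | c :: t => pvStep c (pvSqueeze t)

def pvG (c : Char) : Char := if PySem.Chars.isalnum c then c else '_'

def pvP (c : Char) : Bool := [ '_' ].contains c

def pvRstrip (s : List Char) : List Char := (List.dropWhile pvP s.reverse).reverse
def pvStrip (s : List Char) : List Char := pvRstrip (List.dropWhile pvP s)

-- the suffix B's fold emits once out is nonempty (b = the pending flag)
def pvEmit : Bool → List Char → List Char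
  | _, [] => []
  | b, c :: t =>
      if PySem.Chars.isalnum c then (if b then '_' :: c :: pvEmit false t else c :: pvEmit false t)
      else pvEmit true t

def pvEmitAll : List Char → List Char
  | [] => []
  | c :: t => if PySem.Chars.isalnum c then c :: pvEmit false t else pvEmitAll t

theorem pvStep_u_u (r : List Char) : pvStep '_' (pvStep '_' r) = pvStep '_' r := by
  by_cases h : r.head? = some '_' <;> simp [pvStep, h]

theorem pvSqueeze_cons (c : Char) (t : List Char) :
    pvSqueeze (c :: t) = pvStep c (pvSqueeze t) := rfl

theorem pvSqueeze_collapse1 (s : List Char) : pvSqueeze (pvCollapse1 s) = pvSqueeze s := by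
  fun_induction pvCollapse1 s with
  | case1 => rfl
  | case2 c t h ih =>
      obtain ⟨rfl, h2⟩ := h
      cases t with
      | nil => simp at h2
      | cons d t' =>
          have hd : d = '_' := by simpa using h2
          subst hd
          simp only [List.tail_cons] at ih ⊢
          rw [pvSqueeze_cons, ih, pvSqueeze_cons, pvSqueeze_cons, pvStep_u_u]
  | case3 c t h ih =>
      rw [pvSqueeze_cons, ih, pvSqueeze_cons]

theorem pvSqueeze_of_no_uu (s : List Char) (h : ¬ ['_', '_'] <:+: s) : pvSqueeze s = s := by
  induction s with
  | nil => rfl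
  | cons c t ih =>
      rw [List.infix_cons_iff] at h
      push_neg at h
      have ht := ih h.2
      rw [pvSqueeze_cons, ht, pvStep]
      by_cases hc : c = '_' ∧ t.head? = some '_'
      · obtain ⟨rfl, h2⟩ := hc
        cases t with
        | nil => simp at h2
        | cons d t' =>
            have hd : d = '_' := by simpa using h2
            subst hd
            exact absurd ⟨t', rfl⟩ h.1
      · simp [hc]

theorem pvCollapseLoop_eq_squeeze (s : List Char) : pvCollapseLoop s = pvSqueeze s := by
  fun_induction pvCollapseLoop s with
  | case1 s h ih => rw [ih, pvReplace_uu, pvSqueeze_collapse1]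
  | case2 s h =>
      rw [pvSqueeze_of_no_uu]
      intro hinf
      exact h ((PySem.Chars.isIn_iff_infix _ _).mpr hinf)

theorem pvG_map (name : List Char) :
    (PySem.Chars.replace (PySem.Chars.replace name [' '] ['_']) ['-'] ['_']).map
      (fun c => if PySem.Chars.isalnum c || c == '_' then c else '_') = name.map pvG := by
  have h1 : ∀ (a b : Char) (l : List Char),
      PySem.Chars.replace l [a] [b] = l.map (fun c => if c = a then b else c) := by
    intro a b l
    rw [PySem.Chars.replace]
    rw [if_neg (by simp : ¬ ([a].isEmpty = true))]
    have go : ∀ (fuel : Nat) (l acc : List Char), l.length ≤ fuel →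
        PySem.Chars.replace.go [a] [b] fuel l acc =
          acc.reverse ++ l.map (fun c => if c = a then b else c) := by
      intro fuel
      induction fuel with
      | zero => intro l acc h; have : l = [] := by cases l <;> simp_all
                subst this; simp [PySem.Chars.replace.go]
      | succ fuel ih =>
          intro l acc h
          cases l with
          | nil => simp [PySem.Chars.replace.go]
          | cons c t =>
              rw [PySem.Chars.replace.go]
              by_cases hc : c = a
              · subst hc
                simp only [List.isPrefixOf, beq_self_eq_true, Bool.true_and,
                  List.isPrefixOf_nil_left, if_true]
                rw [ih _ _ (by simp at h ⊢; try omega)]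
                simp
              · have hnp : [a].isPrefixOf (c :: t) = false := by
                  simp [List.isPrefixOf]
                  exact fun hh => hc hh.symm
                simp only [hnp, Bool.false_eq_true, if_false]
                rw [ih _ _ (by simp at h ⊢; omega)]
                simp [hc]
    simpa using go l.length l [] le_rfl
  rw [h1, h1, List.map_map, List.map_map]
  apply List.map_congr_left
  intro c _
  simp only [Function.comp]
  by_cases hsp : c = ' '
  · subst hsp; simp [pvG]; decide
  · by_cases hda : c = '-'
    · subst hda; simp [pvG]; decide
    · simp only [hsp, hda, if_false]
      by_cases hu : c = '_'
      · subst hu; simp [pvG]; try decide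
      · simp only [pvG]
        by_cases ha : PySem.Chars.isalnum c <;> simp [ha, hu]

theorem pvAlnum_ne_underscore {c : Char} (h : PySem.Chars.isalnum c = true) : ¬ c = '_' := by
  intro h'; subst h'; exact absurd h (by decide)

-- B's fold, once out is nonempty, appends pvEmit
theorem pvFold_emit (cs : List Char) (out : List Char) (pending : Bool) (h : out ≠ []) :
    (cs.foldl pvEmitStep (out, pending)).1 = out ++ pvEmit pending cs := by
  induction cs generalizing out pending with
  | nil => simp [pvEmit]
  | cons c t ih =>
      rw [List.foldl_cons]
      by_cases hc : PySem.Chars.isalnum c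
      · rw [show pvEmitStep (out, pending) c
            = ((if pending then out ++ ['_'] else out) ++ [c], false) by simp [pvEmitStep, hc]]
        rw [ih _ _ (by cases pending <;> simp)]
        cases pending <;> simp [pvEmit, hc]
      · rw [show pvEmitStep (out, pending) c = (out, true) by
            simp [pvEmitStep, hc, List.isEmpty_iff, h]]
        rw [ih _ _ h]
        simp [pvEmit, hc]

theorem pvFold_emitAll (cs : List Char) :
    (cs.foldl pvEmitStep ([], false)).1 = pvEmitAll cs := by
  induction cs with
  | nil => rfl
  | cons c t ih =>
      rw [List.foldl_cons]
      by_cases hc : PySem.Chars.isalnum c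
      · rw [show pvEmitStep ([], false) c = ([c], false) by simp [pvEmitStep, hc]]
        rw [pvFold_emit t [c] false (by simp)]
        simp [pvEmitAll, hc]
      · rw [show pvEmitStep ([], false) c = ([], false) by simp [pvEmitStep, hc]]
        rw [ih]
        simp [pvEmitAll, hc]

theorem pvRstrip_cons_ne (c : Char) (r : List Char) (hc : pvP c = false) :
    pvRstrip (c :: r) = c :: pvRstrip r := by
  unfold pvRstrip
  rw [List.reverse_cons, List.dropWhile_append]
  by_cases h : (List.dropWhile pvP r.reverse).isEmpty
  · rw [if_pos h, List.isEmpty_iff.mp h]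
    simp [List.dropWhile_cons, hc]
  · rw [if_neg h]
    simp

theorem pvRstrip_cons_of_ne_nil (x : Char) (xs : List Char) (h : pvRstrip xs ≠ []) :
    pvRstrip (x :: xs) = x :: pvRstrip xs := by
  unfold pvRstrip at h ⊢
  rw [List.reverse_cons, List.dropWhile_append]
  have hne : ¬ (List.dropWhile pvP xs.reverse).isEmpty := by
    intro he
    exact h (by rw [List.isEmpty_iff.mp he]; rfl)
  rw [if_neg hne]
  simp

theorem pvIfTrue (x : List Char) :
    ((if (true : Bool) = true then ['_'] else []) ++ x) = '_' :: x := rfl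

theorem pvIfFalse (x : List Char) :
    ((if (false : Bool) = true then ['_'] else []) ++ x) = x := rfl

theorem pvRstrip_squeeze_emit (t : List Char) (b : Bool) :
    pvRstrip (pvSqueeze ((if b then ['_'] else []) ++ t.map pvG)) = pvEmit b t := by
  induction t generalizing b with
  | nil =>
      cases b
      · rfl
      · show pvRstrip (pvSqueeze ['_']) = []
        decide
  | cons c t ih =>
      by_cases hc : PySem.Chars.isalnum c
      · have hcu : ¬ c = '_' := pvAlnum_ne_underscore hc
        have hmap : List.map pvG (c :: t) = c :: List.map pvG t := by simp [pvG, hc]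
        have hstep : pvSqueeze (c :: List.map pvG t) = c :: pvSqueeze (List.map pvG t) := by
          rw [pvSqueeze_cons, pvStep]; simp [hcu]
        have hfalse := ih (b := false)
        rw [pvIfFalse] at hfalse
        have hinner : pvRstrip (c :: pvSqueeze (List.map pvG t)) = c :: pvEmit false t := by
          rw [pvRstrip_cons_ne c _ (by simp [pvP, hcu]), hfalse]
        cases b
        · rw [pvIfFalse, hmap, hstep, hinner]
          simp [pvEmit, hc]
        · rw [pvIfTrue, hmap, pvSqueeze_cons, hstep]
          have hstep2 : pvStep '_' (c :: pvSqueeze (List.map pvG t))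
              = '_' :: c :: pvSqueeze (List.map pvG t) := by
            rw [pvStep]; simp [hcu]
          rw [hstep2, pvRstrip_cons_of_ne_nil '_' _ (by rw [hinner]; simp), hinner]
          simp [pvEmit, hc]
      · have hmap : List.map pvG (c :: t) = '_' :: List.map pvG t := by simp [pvG, hc]
        have htrue := ih (b := true)
        rw [pvIfTrue] at htrue
        cases b
        · rw [pvIfFalse, hmap, htrue]
          simp [pvEmit, hc]
        · rw [pvIfTrue, hmap, pvSqueeze_cons, pvSqueeze_cons, pvStep_u_u, ← pvSqueeze_cons,
              htrue]
          simp [pvEmit, hc]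

theorem pvStrip_squeeze_emitAll (cs : List Char) :
    pvStrip (pvSqueeze (cs.map pvG)) = pvEmitAll cs := by
  induction cs with
  | nil => rfl
  | cons c t ih =>
      by_cases hc : PySem.Chars.isalnum c
      · have hcu : ¬ c = '_' := pvAlnum_ne_underscore hc
        have hmap : List.map pvG (c :: t) = c :: List.map pvG t := by simp [pvG, hc]
        rw [hmap, pvSqueeze_cons]
        rw [show pvStep c (pvSqueeze (List.map pvG t)) = c :: pvSqueeze (List.map pvG t) by
              rw [pvStep]; simp [hcu]]
        unfold pvStrip
        rw [List.dropWhile_cons_of_neg (by simp [pvP, hcu])]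
        rw [pvRstrip_cons_ne c _ (by simp [pvP, hcu])]
        have hfalse := pvRstrip_squeeze_emit t false
        rw [pvIfFalse] at hfalse
        rw [hfalse]
        simp [pvEmitAll, hc]
      · have hmap : List.map pvG (c :: t) = '_' :: List.map pvG t := by simp [pvG, hc]
        rw [hmap, pvSqueeze_cons]
        have hdrop : List.dropWhile pvP (pvStep '_' (pvSqueeze (List.map pvG t)))
            = List.dropWhile pvP (pvSqueeze (List.map pvG t)) := by
          rw [pvStep]
          by_cases h : (pvSqueeze (List.map pvG t)).head? = some '_'
          · simp [h]
          · simp only [h, and_false, if_false]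
            rw [List.dropWhile_cons_of_pos (by simp [pvP])]
        unfold pvStrip
        rw [hdrop]
        unfold pvStrip at ih
        rw [ih]
        simp [pvEmitAll, hc]

theorem pvStripChars_eq (s : List Char) : PySem.Chars.stripChars s ['_'] = pvStrip s := rfl

-- ===== VERDICT (by name: the statement is the Claim_ definition above) =====
theorem sanitize_field_name_py_spec : Claim_equal_sanitize_field_name_py := by
  intro name existing_names _
  unfold Spec_sanitize_field_name_py sanitize_field_name_py sanitize_field_name_py_alt
  have core : PySem.Chars.stripChars
      (pvCollapseLoop ((PySem.Chars.replace (PySem.Chars.replace name.toList [' '] ['_']) ['-'] ['_']).map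
        (fun c => if PySem.Chars.isalnum c || c == '_' then c else '_'))) ['_']
      = (name.toList.foldl pvEmitStep ([], false)).1 := by
    rw [pvG_map, pvCollapseLoop_eq_squeeze, pvStripChars_eq, pvStrip_squeeze_emitAll,
        pvFold_emitAll]
  simp only [core]
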